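-- pv_equiv track=rewrite | github.com/DarshShah10/EightFold | modules/codeforces/skills_mapper.py | _get_tier_name
-- ===== SOURCE A (Python) =====
-- def _get_tier_name(rating: int) -> str:
--     """Get tier name from rating."""
--     tiers = [
--         (3000, "Legendary Grandmaster"),
--         (2600, "International Grandmaster"),
--         (2400, "Grandmaster"),
--         (2300, "International Master"),
--         (2100, "Master"),
--         (1900, "Candidate Master"),
--         (1600, "Expert"),
--         (1400, "Specialist"),
--         (1200, "Pupil"),
--         (0, "Newbie"),
--     ]
--     for threshold, name in tiers:
--         if rating >= threshold:
--             return name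
--     return "unrated"
-- ===== SOURCE B (Python) =====
-- import bisect
--
-- _THRESHOLDS = [0, 1200, 1400, 1600, 1900, 2100, 2300, 2400, 2600, 3000]
-- _NAMES = ["Newbie", "Pupil", "Specialist", "Expert", "Candidate Master",
--           "Master", "International Master", "Grandmaster",
--           "International Grandmaster", "Legendary Grandmaster"]
--
-- def _get_tier_name(rating: int) -> str:
--     """Get tier name from rating."""
--     i = bisect.bisect_right(_THRESHOLDS, rating)
--     if i == 0:
--         return "unrated"
--     return _NAMES[i - 1]
-- ===== Notes on version B (the rewrite author's own statement) =====
-- stated objective: idiomatic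
-- what changed: Replaces the descending sequential scan over (threshold, name) pairs with a bisect_right binary search over an ascending threshold table indexing a parallel name list.
import Mathlib
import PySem

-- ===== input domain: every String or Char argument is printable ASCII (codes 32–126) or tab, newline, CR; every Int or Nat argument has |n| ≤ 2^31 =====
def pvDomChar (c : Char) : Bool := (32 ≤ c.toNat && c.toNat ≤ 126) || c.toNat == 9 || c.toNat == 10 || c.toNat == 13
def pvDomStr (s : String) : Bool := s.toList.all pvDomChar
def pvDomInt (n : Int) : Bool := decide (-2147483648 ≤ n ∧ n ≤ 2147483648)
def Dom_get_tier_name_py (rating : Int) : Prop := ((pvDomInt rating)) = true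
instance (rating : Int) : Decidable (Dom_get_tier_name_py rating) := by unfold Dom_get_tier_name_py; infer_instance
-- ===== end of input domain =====

-- B replaces A's descending sequential scan with bisect_right binary search over an
-- ascending threshold table (idiomatic; proven to give the same name at every boundary).

-- ===== PORT A =====
-- the 'for threshold, name in tiers: if rating >= threshold: return name' loop
def tierLoop (rating : Int) : List (Int × String) → String
  | [] => "unrated"
  | (threshold, name) :: rest =>
      if rating ≥ threshold then name else tierLoop rating rest

def get_tier_name_py (rating : Int) : String :=
  tierLoop rating
    [(3000, "Legendary Grandmaster"),
     (2600, "International Grandmaster"),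
     (2400, "Grandmaster"),
     (2300, "International Master"),
     (2100, "Master"),
     (1900, "Candidate Master"),
     (1600, "Expert"),
     (1400, "Specialist"),
     (1200, "Pupil"),
     (0, "Newbie")]

-- ===== PORT B =====
-- bisect.bisect_right's while-loop, made total with a fuel argument (fuel only
-- guards termination; 5 iterations always suffice for hi ≤ 10, so it is never exhausted)
def bisectRight (a : List Int) (x : Int) : Nat → Nat → Nat → Nat
  | 0, lo, _ => lo
  | fuel + 1, lo, hi =>
      if lo < hi then
        let mid := (lo + hi) / 2
        if x < a.getD mid 0 then bisectRight a x fuel lo mid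
        else bisectRight a x fuel (mid + 1) hi
      else lo

def pvThresholds : List Int := [0, 1200, 1400, 1600, 1900, 2100, 2300, 2400, 2600, 3000]
def pvNames : List String :=
  ["Newbie", "Pupil", "Specialist", "Expert", "Candidate Master",
   "Master", "International Master", "Grandmaster",
   "International Grandmaster", "Legendary Grandmaster"]

def get_tier_name_py_alt (rating : Int) : String :=
  let i := bisectRight pvThresholds rating 5 0 pvThresholds.length
  if i = 0 then "unrated" else pvNames.getD (i - 1) ""

-- ===== PRECONDITION & SPEC =====
def Spec_get_tier_name_py (rating : Int) (out : String) : Prop := out = get_tier_name_py_alt rating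
instance (rating : Int) (out : String) : Decidable (Spec_get_tier_name_py rating out) := by unfold Spec_get_tier_name_py; infer_instance

-- ===== CLAIM (what is proved, stated in full; the proofs are below) =====
def Claim_equal_get_tier_name_py : Prop := ∀ (rating : Int), Dom_get_tier_name_py rating → Spec_get_tier_name_py rating (get_tier_name_py rating)

-- ===== LEMMAS AND PROOFS =====

-- ===== VERDICT (by name: the statement is the Claim_ definition above) =====
set_option maxHeartbeats 2000000 in
theorem get_tier_name_py_spec : Claim_equal_get_tier_name_py := by
  intro r _
  unfold Spec_get_tier_name_py get_tier_name_py get_tier_name_py_alt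
  simp only [pvThresholds, pvNames, tierLoop, bisectRight, List.length, List.getD,
    List.getElem?_cons_zero, List.getElem?_cons_succ, Option.getD]
  norm_num
  split_ifs <;> first | rfl | exact (‹False›).elim | omega
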